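-- pv_equiv track=rewrite | github.com/stone12222/stone12222.github.io | _a/CCC-mid/array_2d/a10_change_direction1.py | getDirection
-- ===== SOURCE A (Python) =====
-- def getDirection(dir, turns):
--     for turn in turns:
--         if turn=='R':
--             dir+=90
--         elif turn=='L':
--             dir-=90
--         dir%=360
--     return dir
-- ===== SOURCE B (Python) =====
-- def getDirection(dir, turns):
--     return (dir + 90 * (turns.count('R') - turns.count('L'))) % 360
-- ===== Notes on version B (the rewrite author's own statement) =====
-- stated objective: simpler
-- what changed: Replaces the per-turn loop with a closed form: count 'R' and 'L' once and return (dir + 90*net) % 360.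
-- intended difference: On empty turns with dir outside [0,360) A returns dir unnormalized (its % 360 sits inside the loop that never runs) while B returns dir % 360, the normalized direction a caller of this function expects. — e.g. on getDirection(450, []): A returns 450, B returns 90
import Mathlib
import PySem

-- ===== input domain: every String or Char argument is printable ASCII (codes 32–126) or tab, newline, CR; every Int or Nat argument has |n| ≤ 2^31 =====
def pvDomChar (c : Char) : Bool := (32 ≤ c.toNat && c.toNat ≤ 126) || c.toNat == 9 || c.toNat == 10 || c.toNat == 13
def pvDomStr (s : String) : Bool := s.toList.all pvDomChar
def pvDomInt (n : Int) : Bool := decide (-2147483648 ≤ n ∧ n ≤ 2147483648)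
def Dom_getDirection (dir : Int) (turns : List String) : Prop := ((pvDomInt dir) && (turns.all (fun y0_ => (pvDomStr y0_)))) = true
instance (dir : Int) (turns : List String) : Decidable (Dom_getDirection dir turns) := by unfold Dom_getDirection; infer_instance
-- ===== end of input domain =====

-- ===== PORT A =====
-- B replaces A's per-turn loop with a single closed form; simpler, same cost.
def getDirection (dir : Int) (turns : List String) : Int :=
  turns.foldl (fun d turn =>
    PySem.Int.mod (if turn == "R" then d + 90 else if turn == "L" then d - 90 else d) 360) dir

-- ===== PORT B =====
def getDirection_alt (dir : Int) (turns : List String) : Int :=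
  PySem.Int.mod (dir + 90 * ((PySem.List.count turns "R" : Int) - (PySem.List.count turns "L" : Int))) 360

-- ===== PRECONDITION & SPEC =====
-- On empty turns with dir outside [0,360) A returns dir unnormalized (its % 360 sits
-- inside the loop that never runs) while B returns dir % 360, the normalized direction.
def D_getDirection (dir : Int) (turns : List String) : Prop :=
  turns = [] ∧ ¬ (0 ≤ dir ∧ dir < 360)
instance (dir : Int) (turns : List String) : Decidable (D_getDirection dir turns) := by
  unfold D_getDirection; infer_instance
def Spec_getDirection (dir : Int) (turns : List String) (out : Int) : Prop :=
  ¬ D_getDirection dir turns → out = getDirection_alt dir turns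
instance (dir : Int) (turns : List String) (out : Int) : Decidable (Spec_getDirection dir turns out) := by
  unfold Spec_getDirection; infer_instance
def pvDiffWitness_getDirection : Int × List String := (450, [])
def pvDiffWitnessOut_getDirection : Int × Int := (450, 90)

-- ===== CLAIM (what is proved, stated in full; the proofs are below) =====
def Claim_unchanged_getDirection : Prop := ∀ (dir : Int) (turns : List String), Dom_getDirection dir turns → Spec_getDirection dir turns (getDirection dir turns)
def Claim_changed_getDirection : Prop := Dom_getDirection (pvDiffWitness_getDirection.1) (pvDiffWitness_getDirection.2) ∧ D_getDirection (pvDiffWitness_getDirection.1) (pvDiffWitness_getDirection.2) ∧ getDirection (pvDiffWitness_getDirection.1) (pvDiffWitness_getDirection.2) = pvDiffWitnessOut_getDirection.1 ∧ getDirection_alt (pvDiffWitness_getDirection.1) (pvDiffWitness_getDirection.2) = pvDiffWitnessOut_getDirection.2 ∧ pvDiffWitnessOut_getDirection.1 ≠ pvDiffWitnessOut_getDirection.2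
def Claim_exact_getDirection : Prop := ∀ (dir : Int) (turns : List String), Dom_getDirection dir turns → D_getDirection dir turns → getDirection dir turns ≠ getDirection_alt dir turns

-- ===== LEMMAS AND PROOFS =====
theorem getDirection_count (dir : Int) (turns : List String) (h : turns ≠ []) :
    getDirection dir turns
      = (dir + 90 * ((PySem.List.count turns "R" : Int) - (PySem.List.count turns "L" : Int))) % 360 := by
  induction turns generalizing dir with
  | nil => exact absurd rfl h
  | cons t rest ih =>
    have hmod : ∀ a : Int, PySem.Int.mod a 360 = a % 360 := fun a =>
      PySem.Int.mod_eq_emod_of_pos (by norm_num)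
    have hstep : getDirection dir (t :: rest)
        = getDirection (PySem.Int.mod (if t == "R" then dir + 90 else if t == "L" then dir - 90 else dir) 360) rest := rfl
    have hc : ∀ s : String, (PySem.List.count (t :: rest) s : Int)
        = (if t == s then 1 else 0) + (PySem.List.count rest s : Int) := by
      intro s
      by_cases h1 : t == s <;> simp [PySem.List.count, List.count_cons, h1] <;>
        simp_all <;> push_cast <;> ring
    by_cases hr : rest = []
    · subst hr
      rw [hstep, hc "R", hc "L"]
      simp only [getDirection, List.foldl, hmod, PySem.List.count, List.count_nil]
      by_cases h1 : t == "R" <;> by_cases h2 : t == "L" <;>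
        simp_all <;> (try (push_cast; omega))
    · rw [hstep, ih _ hr, hmod, Int.emod_add_emod, hc "R", hc "L"]
      by_cases h1 : t == "R" <;> by_cases h2 : t == "L" <;>
        simp_all <;> (try (push_cast; omega))

-- ===== VERDICT (by name: the statement is the Claim_ definition above) =====
theorem getDirection_spec : Claim_unchanged_getDirection := by
  intro dir turns _ hnD
  unfold D_getDirection at hnD
  by_cases hr : turns = []
  · rcases not_and_or.mp (fun hx => hnD ⟨hr, hx.2⟩) with hx | hx
    · exact absurd hr hx
    · have hrange := not_not.mp hx
      subst hr
      simp only [getDirection, getDirection_alt, List.foldl, PySem.List.count, List.count_nil,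
        PySem.Int.mod_eq_emod_of_pos (b := 360) (by norm_num)]
      push_cast
      omega
  · rw [getDirection_count dir turns hr]
    simp [getDirection_alt, PySem.Int.mod_eq_emod_of_pos (b := 360) (by norm_num)]

theorem getDirection_changed : Claim_changed_getDirection := by
  unfold Claim_changed_getDirection; decide

theorem getDirection_tight : Claim_exact_getDirection := by
  intro dir turns _ hD
  obtain ⟨hnil, hrange⟩ := hD
  subst hnil
  simp only [getDirection, getDirection_alt, List.foldl, PySem.List.count, List.count_nil,
    PySem.Int.mod_eq_emod_of_pos (b := 360) (by norm_num)]
  have h1 := Int.emod_nonneg (dir + 90 * ((0:Int) - 0)) (by norm_num : (360:Int) ≠ 0)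
  have h2 := Int.emod_lt_of_pos (dir + 90 * ((0:Int) - 0)) (by norm_num : (0:Int) < 360)
  omega
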